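-- pv_equiv track=rewrite | github.com/bhavdeep98/powerlawexperiments | analysis/workflow_grammar_extractor.py | tokenize_trace
-- ===== SOURCE A (Python) =====
-- from typing import List, Dict, Any
--
-- def tokenize_trace(trace_text: str) -> List[str]:
--     """
--     Converts a raw text trace into a sequence of abstract tokens.
--     E.g., "Reasoning: ... Tool Call: calculator ..." -> ["REASON", "TOOL_CALC", ...]
--     """
--     tokens = []
--
--     # Split by typical separators or just scan line by line
--     # Check if it's a single-line trace (contains "->")
--     if "\n" not in trace_text and ("->" in trace_text or "|" in trace_text):
--          # Normalize separators
--          trace_text = trace_text.replace("|", "\n").replace("->", "\n")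
--
--     lines = trace_text.split('\n')
--
--     for line in lines:
--         line = line.strip()
--         if not line:
--             continue
--
--         # Simple heuristic mapping
--         if "Reasoning:" in line or "Thinking:" in line:
--             tokens.append("THOUGHT")
--         elif "Tool Call:" in line or "Action:" in line:
--             # Extract specific tool if possible
--             if "calculate" in line.lower():
--                 tokens.append("TOOL_CALC")
--             elif "search" in line.lower():
--                 tokens.append("TOOL_SEARCH")
--             else:
--                 tokens.append("TOOL_GENERIC")
--         elif "Observation:" in line or "Result:" in line:
--             tokens.append("OBSERVATION")
--         elif "Error:" in line or "Invalid" in line: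
--             tokens.append("ERROR")
--         elif "Final Answer:" in line or "Solution:" in line:
--             tokens.append("SOLUTION")
--         elif "Operation:" in line:
--             tokens.append("ACTION_OP")
--         elif "Start" in line:
--             tokens.append("START")
--
--     return tokens
-- ===== SOURCE B (Python) =====
-- _RULES = [
--     (("Reasoning:", "Thinking:"), "THOUGHT"),
--     (("Tool Call:", "Action:"), None),  # tool-call rule: token picked per line in the emit phase
--     (("Observation:", "Result:"), "OBSERVATION"),
--     (("Error:", "Invalid"), "ERROR"),
--     (("Final Answer:", "Solution:"), "SOLUTION"),
--     (("Operation:",), "ACTION_OP"),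
--     (("Start",), "START"),
-- ]
--
--
-- def tokenize_trace(trace_text):
--     if "\n" not in trace_text and ("->" in trace_text or "|" in trace_text):
--         trace_text = trace_text.replace("|", "\n").replace("->", "\n")
--     lines = [l for l in (raw.strip() for raw in trace_text.split("\n")) if l]
--
--     # phase 1 (transposed loops): for each rule in priority order, mark every
--     # still-unmarked line it hits with that rule's index
--     best = [None] * len(lines)
--     for r, (triggers, _tok) in enumerate(_RULES):
--         for i, line in enumerate(lines):
--             if best[i] is None and any(t in line for t in triggers):
--                 best[i] = r
--
--     # phase 2: emit tokens in line order
--     out = []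
--     for i, line in enumerate(lines):
--         r = best[i]
--         if r is None:
--             continue
--         tok = _RULES[r][1]
--         if tok is None:
--             low = line.lower()
--             tok = ("TOOL_CALC" if "calculate" in low
--                    else "TOOL_SEARCH" if "search" in low
--                    else "TOOL_GENERIC")
--         out.append(tok)
--     return out
-- ===== Notes on version B (the rewrite author's own statement) =====
-- stated objective: alternative
-- what changed: Replaces A's single pass with a per-line elif cascade by a transposed two-phase algorithm: an outer loop over the priority-ordered rule table marks each line with the first rule index that hits it, then a second pass emits the tokens (resolving the tool-call rule per line) in line order.
import Mathlib
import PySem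

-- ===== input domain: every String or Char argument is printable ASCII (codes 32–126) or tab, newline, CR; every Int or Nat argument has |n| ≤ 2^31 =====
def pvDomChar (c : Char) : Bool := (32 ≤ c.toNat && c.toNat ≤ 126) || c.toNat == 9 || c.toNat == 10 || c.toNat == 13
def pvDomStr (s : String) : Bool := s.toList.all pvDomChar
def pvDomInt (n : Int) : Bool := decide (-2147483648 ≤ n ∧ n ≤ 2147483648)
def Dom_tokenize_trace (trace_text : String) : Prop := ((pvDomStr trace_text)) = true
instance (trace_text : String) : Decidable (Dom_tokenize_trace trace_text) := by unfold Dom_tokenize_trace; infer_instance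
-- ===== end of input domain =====

-- B replaces A's per-line elif cascade by a transposed two-phase algorithm (mark lines per rule,
-- then emit); same return value (objective: alternative).

-- ===== PORT A =====
-- one iteration of A's for-loop body: strip, skip empty, elif cascade appending to tokens
def tokALine (tokens : List String) (line0 : List Char) : List String :=
  let line := PySem.Chars.strip line0
  if line = [] then tokens
  else if PySem.Chars.isIn "Reasoning:".toList line || PySem.Chars.isIn "Thinking:".toList line then
    tokens ++ ["THOUGHT"]
  else if PySem.Chars.isIn "Tool Call:".toList line || PySem.Chars.isIn "Action:".toList line then
    if PySem.Chars.isIn "calculate".toList (PySem.Chars.lower line) then tokens ++ ["TOOL_CALC"]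
    else if PySem.Chars.isIn "search".toList (PySem.Chars.lower line) then tokens ++ ["TOOL_SEARCH"]
    else tokens ++ ["TOOL_GENERIC"]
  else if PySem.Chars.isIn "Observation:".toList line || PySem.Chars.isIn "Result:".toList line then
    tokens ++ ["OBSERVATION"]
  else if PySem.Chars.isIn "Error:".toList line || PySem.Chars.isIn "Invalid".toList line then
    tokens ++ ["ERROR"]
  else if PySem.Chars.isIn "Final Answer:".toList line || PySem.Chars.isIn "Solution:".toList line then
    tokens ++ ["SOLUTION"]
  else if PySem.Chars.isIn "Operation:".toList line then tokens ++ ["ACTION_OP"]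
  else if PySem.Chars.isIn "Start".toList line then tokens ++ ["START"]
  else tokens

def tokenize_trace (trace_text : String) : List String :=
  let t := trace_text.toList
  let t :=
    if ¬ PySem.Chars.isIn "\n".toList t ∧
        (PySem.Chars.isIn "->".toList t ∨ PySem.Chars.isIn "|".toList t) then
      PySem.Chars.replace (PySem.Chars.replace t "|".toList "\n".toList) "->".toList "\n".toList
    else t
  (PySem.Chars.splitOn t "\n".toList).foldl tokALine []

-- ===== PORT B =====
-- B's priority-ordered rule table _RULES (none = the tool-call rule, resolved in the emit phase)
def pvRules : List (List (List Char) × Option String) :=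
  [ (["Reasoning:".toList, "Thinking:".toList], some "THOUGHT"),
    (["Tool Call:".toList, "Action:".toList], none),
    (["Observation:".toList, "Result:".toList], some "OBSERVATION"),
    (["Error:".toList, "Invalid".toList], some "ERROR"),
    (["Final Answer:".toList, "Solution:".toList], some "SOLUTION"),
    (["Operation:".toList], some "ACTION_OP"),
    (["Start".toList], some "START") ]

-- phase 1, inner loop: mark every still-unmarked line hit by rule r's triggers
def pvMarkRule (lines : List (List Char)) (best : List (Option Int)) (r : Int)
    (trigs : List (List Char)) : List (Option Int) :=
  (best.zip lines).map (fun bl =>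
    match bl.1 with
    | some b => some b
    | none => if trigs.any (fun t => PySem.Chars.isIn t bl.2) then some r else none)

-- phase 2 per line: _RULES[r][1], with the tool-call rule resolved on line.lower()
def pvResolve (r : Int) (line : List Char) : String :=
  match (PySem.List.pyGetD pvRules r ([], none)).2 with
  | some tok => tok
  | none =>
    let low := PySem.Chars.lower line
    if PySem.Chars.isIn "calculate".toList low then "TOOL_CALC"
    else if PySem.Chars.isIn "search".toList low then "TOOL_SEARCH"
    else "TOOL_GENERIC"

def tokenize_trace_alt (trace_text : String) : List String :=
  let t := trace_text.toList
  let t :=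
    if ¬ PySem.Chars.isIn "\n".toList t ∧
        (PySem.Chars.isIn "->".toList t ∨ PySem.Chars.isIn "|".toList t) then
      PySem.Chars.replace (PySem.Chars.replace t "|".toList "\n".toList) "->".toList "\n".toList
    else t
  let lines := ((PySem.Chars.splitOn t "\n".toList).map PySem.Chars.strip).filter (fun l => l ≠ [])
  let best := (PySem.List.enumerate pvRules).foldl
      (fun best rt => pvMarkRule lines best rt.1 rt.2.1)
      (lines.map fun _ => (none : Option Int))
  (best.zip lines).foldl (fun out bl =>
      match bl.1 with
      | none => out
      | some r => out ++ [pvResolve r bl.2]) []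

-- ===== PRECONDITION & SPEC =====
def Spec_tokenize_trace (trace_text : String) (out : List String) : Prop := out = tokenize_trace_alt trace_text
instance (trace_text : String) (out : List String) : Decidable (Spec_tokenize_trace trace_text out) := by unfold Spec_tokenize_trace; infer_instance

-- ===== CLAIM (what is proved, stated in full; the proofs are below) =====
def Claim_equal_tokenize_trace : Prop := ∀ (trace_text : String), Dom_tokenize_trace trace_text → Spec_tokenize_trace trace_text (tokenize_trace trace_text)

-- ===== LEMMAS AND PROOFS =====

-- A's elif cascade on an (already stripped) line, as an Option
def pvCasc (line : List Char) : Option String :=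
  if PySem.Chars.isIn "Reasoning:".toList line || PySem.Chars.isIn "Thinking:".toList line then
    some "THOUGHT"
  else if PySem.Chars.isIn "Tool Call:".toList line || PySem.Chars.isIn "Action:".toList line then
    if PySem.Chars.isIn "calculate".toList (PySem.Chars.lower line) then some "TOOL_CALC"
    else if PySem.Chars.isIn "search".toList (PySem.Chars.lower line) then some "TOOL_SEARCH"
    else some "TOOL_GENERIC"
  else if PySem.Chars.isIn "Observation:".toList line || PySem.Chars.isIn "Result:".toList line then
    some "OBSERVATION"
  else if PySem.Chars.isIn "Error:".toList line || PySem.Chars.isIn "Invalid".toList line then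
    some "ERROR"
  else if PySem.Chars.isIn "Final Answer:".toList line || PySem.Chars.isIn "Solution:".toList line then
    some "SOLUTION"
  else if PySem.Chars.isIn "Operation:".toList line then some "ACTION_OP"
  else if PySem.Chars.isIn "Start".toList line then some "START"
  else none

-- what one cell of `best` becomes after folding the rule list rs
def pvCell (rs : List (Int × (List (List Char) × Option String))) (b : Option Int)
    (l : List Char) : Option Int :=
  rs.foldl (fun b rt =>
    match b with
    | some x => some x
    | none => if rt.2.1.any (fun t => PySem.Chars.isIn t l) then some rt.1 else none) b

lemma pvCasc_nil : pvCasc [] = none := by decide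

lemma tokALine_eq (tokens : List String) (line : List Char) :
    tokALine tokens line = tokens ++ (pvCasc (PySem.Chars.strip line)).toList := by
  by_cases h : PySem.Chars.strip line = []
  · simp [tokALine, h, pvCasc_nil]
  · unfold tokALine pvCasc
    simp only [h, if_false]
    split_ifs <;> simp_all

lemma foldl_tokALine (lines : List (List Char)) (acc : List String) :
    lines.foldl tokALine acc =
      acc ++ lines.filterMap (fun line => pvCasc (PySem.Chars.strip line)) := by
  induction lines generalizing acc with
  | nil => simp
  | cons l ls ih =>
    simp only [List.foldl_cons, List.filterMap_cons, ih, tokALine_eq]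
    cases pvCasc (PySem.Chars.strip l) <;> simp

lemma zip_map_zip (f : Option Int × List Char → Option Int) :
    ∀ (best : List (Option Int)) (lines : List (List Char)),
      ((best.zip lines).map f).zip lines = (best.zip lines).map (fun p => (f p, p.2)) := by
  intro best
  induction best with
  | nil => intro lines; simp
  | cons b bs ih => intro lines; cases lines <;> simp [ih]

lemma fold_mark (rs : List (Int × (List (List Char) × Option String))) :
    ∀ (best : List (Option Int)) (lines : List (List Char)), best.length = lines.length →
      rs.foldl (fun best rt => pvMarkRule lines best rt.1 rt.2.1) best =
        (best.zip lines).map (fun p => pvCell rs p.1 p.2) := by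
  induction rs with
  | nil =>
    intro best lines h
    simp only [List.foldl_nil, pvCell]
    exact (by simpa using (List.map_fst_zip (le_of_eq h)).symm)
  | cons rt rest ih =>
    intro best lines h
    rw [List.foldl_cons]
    rw [ih (pvMarkRule lines best rt.1 rt.2.1) lines
      (by simp [pvMarkRule, List.length_zip, h])]
    unfold pvMarkRule
    rw [zip_map_zip, List.map_map]
    rfl

lemma foldl_emit (pairs : List (Option Int × List Char)) (acc : List String) :
    pairs.foldl (fun out bl =>
        match bl.1 with
        | none => out
        | some r => out ++ [pvResolve r bl.2]) acc =
      acc ++ pairs.filterMap (fun p => p.1.map (fun r => pvResolve r p.2)) := by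
  induction pairs generalizing acc with
  | nil => simp
  | cons p ps ih =>
    rcases p with ⟨b, l⟩
    cases b <;> simp [ih]

lemma cell_some (rs : List (Int × (List (List Char) × Option String))) (x : Int) (l : List Char) :
    pvCell rs (some x) l = some x := by
  induction rs with
  | nil => rfl
  | cons rt rest ih => simpa [pvCell, List.foldl_cons] using ih

lemma cell_nil (l : List Char) : pvCell [] none l = none := rfl

lemma cell_none_cons (rt : Int × (List (List Char) × Option String))
    (rest : List (Int × (List (List Char) × Option String))) (l : List Char) :
    pvCell (rt :: rest) none l =
      if rt.2.1.any (fun t => PySem.Chars.isIn t l) then some rt.1 else pvCell rest none l := by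
  show pvCell rest (if rt.2.1.any (fun t => PySem.Chars.isIn t l) then some rt.1 else none) l = _
  by_cases h : rt.2.1.any (fun t => PySem.Chars.isIn t l) = true
  · rw [if_pos h, if_pos h, cell_some]
  · rw [if_neg h, if_neg h]

-- resolving each concrete rule index
lemma res0 (l : List Char) : pvResolve 0 l = "THOUGHT" := rfl
lemma res1 (l : List Char) : pvResolve 1 l =
    (if PySem.Chars.isIn "calculate".toList (PySem.Chars.lower l) then "TOOL_CALC"
     else if PySem.Chars.isIn "search".toList (PySem.Chars.lower l) then "TOOL_SEARCH"
     else "TOOL_GENERIC") := rfl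
lemma res2 (l : List Char) : pvResolve 2 l = "OBSERVATION" := rfl
lemma res3 (l : List Char) : pvResolve 3 l = "ERROR" := rfl
lemma res4 (l : List Char) : pvResolve 4 l = "SOLUTION" := rfl
lemma res5 (l : List Char) : pvResolve 5 l = "ACTION_OP" := rfl
lemma res6 (l : List Char) : pvResolve 6 l = "START" := rfl

-- per-line agreement: B's marked rule index resolved = A's cascade
lemma cell_resolve (l : List Char) :
    (pvCell (PySem.List.enumerate pvRules) none l).map (fun r => pvResolve r l) = pvCasc l := by
  have e : PySem.List.enumerate pvRules =
      [ (0, ["Reasoning:".toList, "Thinking:".toList], some "THOUGHT"),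
        (1, ["Tool Call:".toList, "Action:".toList], none),
        (2, ["Observation:".toList, "Result:".toList], some "OBSERVATION"),
        (3, ["Error:".toList, "Invalid".toList], some "ERROR"),
        (4, ["Final Answer:".toList, "Solution:".toList], some "SOLUTION"),
        (5, ["Operation:".toList], some "ACTION_OP"),
        (6, ["Start".toList], some "START") ] := by
    simp [pvRules, PySem.List.enumerate_cons, PySem.List.enumerate_nil]
  rw [e]
  simp only [cell_none_cons, cell_nil, List.any_cons, List.any_nil, Bool.or_false]
  unfold pvCasc
  split_ifs <;> simp_all [res0, res1, res2, res3, res4, res5, res6]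

lemma zip_self_map {α β : Type} (g : α → β) (xs : List α) :
    (xs.map g).zip xs = xs.map (fun x => (g x, x)) := by
  induction xs with
  | nil => rfl
  | cons x t ih => simp [ih]

lemma filterMap_filter_strip (g : List Char → Option String) (h : g [] = none)
    (raw : List (List Char)) :
    (((raw.map PySem.Chars.strip).filter (fun l => l ≠ [])).filterMap g) =
      raw.filterMap (fun l0 => g (PySem.Chars.strip l0)) := by
  induction raw with
  | nil => rfl
  | cons l0 t ih =>
    rw [List.map_cons, List.filter_cons]
    by_cases hl : PySem.Chars.strip l0 = []
    · rw [if_neg (by simp [hl]), ih]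
      simp [hl, h]
    · rw [if_pos (by simp [hl])]
      simp only [List.filterMap_cons]
      cases hg : g (PySem.Chars.strip l0) <;> simp [hg] <;> simpa using ih

-- ===== VERDICT (by name: the statement is the Claim_ definition above) =====
theorem tokenize_trace_spec : Claim_equal_tokenize_trace := by
  intro trace_text _
  unfold Spec_tokenize_trace tokenize_trace tokenize_trace_alt
  simp only [foldl_tokALine, List.nil_append]
  rw [← filterMap_filter_strip pvCasc pvCasc_nil]
  rw [fold_mark _ _ _ (by simp), zip_self_map, List.map_map, zip_self_map, foldl_emit,
    List.nil_append, List.filterMap_map]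
  simp only [Function.comp_def, cell_resolve]
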